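-- pv_equiv track=rewrite | github.com/AnishShr/Optimization_Robot_Motion-_Planning | Paper_frenet_frames/highway_sim.py | create_points
-- ===== SOURCE A (Python) =====
-- def create_points(x_frenet, y_frenet):
--
--     points_x = []
--     points_y = []
--
--     for i in range(10):
--         points_x.append((x_frenet+5) + i*5)
--         points_y.append(0)
--
--     for i in range(-4, 13):
--         for j in range(10):
--             points_x.append((x_frenet+5) + j*5)
--             # points_y.append((y_frenet-8) + i)
--             points_y.append(i)
--
--
--     return points_x, points_y
-- ===== SOURCE B (Python) =====
-- def create_points(x_frenet, y_frenet):
--     # Flat index decoding: point k (0 <= k < 180) lies in column k % 10 and row k // 10;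
--     # row 0 has y = 0, rows 1..17 carry y = row - 5 (i.e. -4..12).
--     points_x = [x_frenet + 5 + 5 * (k % 10) for k in range(180)]
--     points_y = [0 if k < 10 else k // 10 - 5 for k in range(180)]
--     return points_x, points_y
-- ===== Notes on version B (the rewrite author's own statement) =====
-- stated objective: alternative
-- what changed: Replaces A's nested append loops with a single flat pass over point indices 0..179 that decodes each coordinate arithmetically (column = k % 10 for x, row = k // 10 with y = 0 for row 0 and row-5 otherwise).
import Mathlib
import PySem

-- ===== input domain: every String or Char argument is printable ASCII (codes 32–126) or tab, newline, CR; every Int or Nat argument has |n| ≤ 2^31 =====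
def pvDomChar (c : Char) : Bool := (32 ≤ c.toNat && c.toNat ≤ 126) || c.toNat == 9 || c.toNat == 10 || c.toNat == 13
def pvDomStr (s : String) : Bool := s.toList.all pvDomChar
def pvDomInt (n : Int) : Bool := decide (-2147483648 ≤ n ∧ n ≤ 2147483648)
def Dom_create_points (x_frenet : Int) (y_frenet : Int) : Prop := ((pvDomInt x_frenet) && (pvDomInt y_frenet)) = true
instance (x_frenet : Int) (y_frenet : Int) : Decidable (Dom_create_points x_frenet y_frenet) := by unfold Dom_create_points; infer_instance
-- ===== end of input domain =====

-- B replaces A's nested append loops with one flat pass over indices 0..179, decoding each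
-- coordinate arithmetically (k % 10 column, k // 10 row); objective: alternative. y_frenet unused in both.

-- ===== PORT A =====
def create_points (x_frenet : Int) (y_frenet : Int) : List Int × List Int :=
  let st : List Int × List Int := ([], [])
  -- for i in range(10): append to both lists
  let st := (PySem.List.pyRange 0 10 1).foldl
    (fun (st : List Int × List Int) i =>
      (st.1 ++ [(x_frenet + 5) + i * 5], st.2 ++ [0])) st
  -- for i in range(-4, 13): for j in range(10): append to both lists
  let st := (PySem.List.pyRange (-4) 13 1).foldl
    (fun (st : List Int × List Int) i =>
      (PySem.List.pyRange 0 10 1).foldl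
        (fun (st : List Int × List Int) j =>
          (st.1 ++ [(x_frenet + 5) + j * 5], st.2 ++ [i])) st) st
  st

-- ===== PORT B =====
def create_points_alt (x_frenet : Int) (y_frenet : Int) : List Int × List Int :=
  let points_x := (PySem.List.pyRange 0 180 1).map
    (fun k => x_frenet + 5 + 5 * PySem.Int.mod k 10)
  let points_y := (PySem.List.pyRange 0 180 1).map
    (fun k => if k < 10 then 0 else PySem.Int.floordiv k 10 - 5)
  (points_x, points_y)

-- ===== PRECONDITION & SPEC =====
def Spec_create_points (x_frenet : Int) (y_frenet : Int) (out : List Int × List Int) : Prop := out = create_points_alt x_frenet y_frenet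
instance (x_frenet : Int) (y_frenet : Int) (out : List Int × List Int) : Decidable (Spec_create_points x_frenet y_frenet out) := by unfold Spec_create_points; infer_instance

-- ===== CLAIM =====
def Claim_equal_create_points : Prop := ∀ (x_frenet : Int) (y_frenet : Int), Dom_create_points x_frenet y_frenet → Spec_create_points x_frenet y_frenet (create_points x_frenet y_frenet)

-- ===== LEMMAS AND PROOFS =====

-- ===== VERDICT =====
set_option maxRecDepth 16000 in
set_option maxHeartbeats 2000000 in
theorem create_points_spec : Claim_equal_create_points := by
  intro x y _
  show create_points x y = create_points_alt x y
  have h1 : PySem.List.pyRange 0 10 1 = [0,1,2,3,4,5,6,7,8,9] := by decide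
  have h2 : PySem.List.pyRange (-4) 13 1 = [-4,-3,-2,-1,0,1,2,3,4,5,6,7,8,9,10,11,12] := by decide
  have h3 : PySem.List.pyRange 0 180 1 =
      (List.range 180).map (fun n => (n : Int)) := by decide
  simp only [create_points, create_points_alt, h1, h2, h3, List.foldl,
    List.cons_append, List.nil_append]
  norm_num [PySem.Int.mod, PySem.Int.floordiv, Int.fmod_eq_emod, Int.fdiv_eq_ediv,
    List.range_succ]
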